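-- pv_equiv track=rewrite | github.com/pyigm/pyigm | pyigm/observing/keck.py | get_name_tag
-- ===== SOURCE A (Python) =====
-- def get_name_tag(tbl_nms,mask=[None]):
--     '''
--     Find the name tag + return
--
--     Parmaters:
--     --------
--     tbl_nms: List of names
--     '''
--     # Target name key
--     name_tag = None
--     for tag in ['Target', 'Name', 'NAME', 'name', 'QSO']:
--         if tag in tbl_nms:
--             name_tag = tag
--             if not name_tag in mask:
--                 break
--
--     # Return
--     return name_tag
-- ===== SOURCE B (Python) =====
-- def get_name_tag(tbl_nms, mask=[None]):
--     # Two-phase: collect the candidate tags present, then select the first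
--     # unmasked one; if all candidates are masked, keep the last candidate.
--     matches = [tag for tag in ('Target', 'Name', 'NAME', 'name', 'QSO')
--                if tag in tbl_nms]
--     for tag in matches:
--         if tag not in mask:
--             return tag
--     return matches[-1] if matches else None
-- ===== Notes on version B (the rewrite author's own statement) =====
-- stated objective: simpler
-- what changed: Replaces A's single interleaved loop with accumulator-and-break by a two-phase collect/select: build the list of candidate tags present, return the first unmasked one, else the last candidate (or None).
import Mathlib
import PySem

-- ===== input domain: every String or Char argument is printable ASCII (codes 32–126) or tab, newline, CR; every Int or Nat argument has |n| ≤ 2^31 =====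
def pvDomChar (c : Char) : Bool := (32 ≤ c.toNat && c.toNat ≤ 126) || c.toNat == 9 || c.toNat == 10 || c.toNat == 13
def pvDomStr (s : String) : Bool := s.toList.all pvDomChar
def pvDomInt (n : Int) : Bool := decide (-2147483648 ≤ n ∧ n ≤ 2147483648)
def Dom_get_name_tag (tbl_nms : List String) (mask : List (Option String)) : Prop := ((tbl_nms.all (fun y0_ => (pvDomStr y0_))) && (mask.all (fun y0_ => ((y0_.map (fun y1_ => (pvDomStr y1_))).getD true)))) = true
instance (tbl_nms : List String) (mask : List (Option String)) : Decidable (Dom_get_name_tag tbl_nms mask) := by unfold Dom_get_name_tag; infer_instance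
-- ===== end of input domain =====

-- B replaces A's interleaved loop-with-break by a two-phase collect/select of candidate tags; equally clear, same cost.


-- ===== PORT A =====
-- the literal tag list of the Python source
def pvTags : List String := ["Target", "Name", "NAME", "name", "QSO"]

-- A's loop: accumulator name_tag, break when the current tag is not in mask
def pvLoopA (tbl_nms : List String) (mask : List (Option String)) :
    List String → Option String → Option String
  | [], acc => acc
  | t :: ts, acc =>
    if tbl_nms.contains t then
      if !(mask.contains (some t)) then some t
      else pvLoopA tbl_nms mask ts (some t)
    else pvLoopA tbl_nms mask ts acc

def get_name_tag (tbl_nms : List String) (mask : List (Option String)) : Option String :=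
  pvLoopA tbl_nms mask pvTags none

-- ===== PORT B =====
def get_name_tag_alt (tbl_nms : List String) (mask : List (Option String)) : Option String :=
  let cand := pvTags.filter (fun t => tbl_nms.contains t)
  match cand.find? (fun t => !(mask.contains (some t))) with
  | some t => some t
  | none => cand.getLast?

-- ===== PRECONDITION & SPEC =====
def Spec_get_name_tag (tbl_nms : List String) (mask : List (Option String)) (out : Option String) : Prop := out = get_name_tag_alt tbl_nms mask
instance (tbl_nms : List String) (mask : List (Option String)) (out : Option String) : Decidable (Spec_get_name_tag tbl_nms mask out) := by unfold Spec_get_name_tag; infer_instance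

-- ===== CLAIM (what is proved, stated in full; the proofs are below) =====
def Claim_equal_get_name_tag : Prop := ∀ (tbl_nms : List String) (mask : List (Option String)), Dom_get_name_tag tbl_nms mask → Spec_get_name_tag tbl_nms mask (get_name_tag tbl_nms mask)

-- ===== LEMMAS AND PROOFS =====

-- B's select phase, written as a match on find?/getLast? generalized over a default
def pvSel (mask : List (Option String)) (ms : List String) (acc : Option String) : Option String :=
  match ms.find? (fun t => !(mask.contains (some t))) with
  | some t => some t
  | none =>
    match ms.getLast? with
    | some t => some t
    | none => acc

-- the common recursive middleman: first unmasked element, else last element, else acc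
def pvSelRec (mask : List (Option String)) : List String → Option String → Option String
  | [], acc => acc
  | t :: ts, acc => if !(mask.contains (some t)) then some t else pvSelRec mask ts (some t)

theorem pvLoopA_eq_selRec (tbl_nms : List String) (mask : List (Option String)) :
    ∀ (tags : List String) (acc : Option String),
      pvLoopA tbl_nms mask tags acc
        = pvSelRec mask (tags.filter (fun t => tbl_nms.contains t)) acc := by
  intro tags
  induction tags with
  | nil => intro acc; simp [pvLoopA, pvSelRec]
  | cons t ts ih =>
    intro acc
    by_cases hm : t ∈ tbl_nms
    · simp [pvLoopA, hm, pvSelRec, ih]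
    · simp [pvLoopA, hm, ih]

theorem pvSel_eq_selRec (mask : List (Option String)) :
    ∀ (ms : List String) (acc : Option String),
      pvSel mask ms acc = pvSelRec mask ms acc := by
  intro ms
  induction ms with
  | nil => intro acc; simp [pvSel, pvSelRec]
  | cons t ts ih =>
    intro acc
    by_cases hp : some t ∈ mask
    · rw [show pvSelRec mask (t :: ts) acc = pvSelRec mask ts (some t) from by
        simp [pvSelRec, hp]]
      rw [← ih (some t)]
      cases hf : ts.find? (fun t => !(decide (some t ∈ mask))) with
      | some u => simp [pvSel, hp, hf]
      | none =>
        cases hl : ts.getLast? with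
        | some u =>
          have h2 : (t :: ts).getLast? = some u := by
            cases ts with
            | nil => simp at hl
            | cons a as => rw [List.getLast?_cons_cons]; exact hl
          simp [pvSel, hp, hf, h2, hl]
        | none =>
          have hnil : ts = [] := List.getLast?_eq_none_iff.mp hl
          subst hnil
          simp [pvSel, hp]
    · simp [pvSel, pvSelRec, hp]

theorem pvAlt_eq_sel (tbl_nms : List String) (mask : List (Option String)) :
    get_name_tag_alt tbl_nms mask
      = pvSel mask (pvTags.filter (fun t => tbl_nms.contains t)) none := by
  simp only [get_name_tag_alt, pvSel]
  cases hf : (pvTags.filter (fun t => tbl_nms.contains t)).find?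
      (fun t => !(mask.contains (some t))) with
  | some u => rfl
  | none =>
    cases hl : (pvTags.filter (fun t => tbl_nms.contains t)).getLast? with
    | some u => rfl
    | none => rfl

-- ===== VERDICT (by name: the statement is the Claim_ definition above) =====
theorem get_name_tag_spec : Claim_equal_get_name_tag := by
  intro tbl_nms mask _
  unfold Spec_get_name_tag get_name_tag
  rw [pvLoopA_eq_selRec, pvAlt_eq_sel, pvSel_eq_selRec]
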